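-- pv_equiv track=rewrite | github.com/espinoso/mentorshipMatchingApp | app.py | is_field_compatible
-- ===== SOURCE A (Python) =====
-- def is_field_compatible(field1, field2):
--     """
--     Check if two fields are same or related
--     Used for validation to detect mismatched high scores
--     """
--     # Normalize fields
--     f1 = str(field1).lower().strip()
--     f2 = str(field2).lower().strip()
--
--     # Exact match
--     if f1 == f2:
--         return True
--
--     # Define related field groups based on common academic/professional fields
--     related_groups = [
--         {'biology', 'molecular biology', 'biochemistry', 'biophysics', 'cell biology', 'structural biology'},
--         {'computer science', 'software engineering', 'data science', 'information technology', 'artificial intelligence'},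
--         {'physics', 'applied physics', 'quantum physics', 'astrophysics'},
--         {'chemistry', 'organic chemistry', 'analytical chemistry', 'physical chemistry', 'inorganic chemistry'},
--         {'medicine', 'clinical medicine', 'medical sciences', 'biomedical sciences'},
--         {'engineering', 'mechanical engineering', 'electrical engineering', 'civil engineering'},
--         {'biotechnology', 'bioengineering', 'biomedical engineering'},
--         {'mathematics', 'applied mathematics', 'statistics', 'computational mathematics'},
--         {'neuroscience', 'cognitive science', 'behavioral neuroscience'},
--         {'genetics', 'genomics', 'molecular genetics'},
--         {'immunology', 'microbiology', 'virology'},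
--         {'pharmacology', 'pharmacy', 'pharmaceutical sciences'},
--         # Add more groups as needed based on your domain
--     ]
--
--     for group in related_groups:
--         if f1 in group and f2 in group:
--             return True
--
--     return False
-- ===== SOURCE B (Python) =====
-- # Flat lookup table: each known field with the index of its related-field group,
-- # listed alphabetically; turned into a dict once at import.
-- _PAIRS = [
--     ('analytical chemistry', 3),
--     ('applied mathematics', 7),
--     ('applied physics', 2),
--     ('artificial intelligence', 1),
--     ('astrophysics', 2),
--     ('behavioral neuroscience', 8),
--     ('biochemistry', 0),
--     ('bioengineering', 6),
--     ('biology', 0),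
--     ('biomedical engineering', 6),
--     ('biomedical sciences', 4),
--     ('biophysics', 0),
--     ('biotechnology', 6),
--     ('cell biology', 0),
--     ('chemistry', 3),
--     ('civil engineering', 5),
--     ('clinical medicine', 4),
--     ('cognitive science', 8),
--     ('computational mathematics', 7),
--     ('computer science', 1),
--     ('data science', 1),
--     ('electrical engineering', 5),
--     ('engineering', 5),
--     ('genetics', 9),
--     ('genomics', 9),
--     ('immunology', 10),
--     ('information technology', 1),
--     ('inorganic chemistry', 3),
--     ('mathematics', 7),
--     ('mechanical engineering', 5),
--     ('medical sciences', 4),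
--     ('medicine', 4),
--     ('microbiology', 10),
--     ('molecular biology', 0),
--     ('molecular genetics', 9),
--     ('neuroscience', 8),
--     ('organic chemistry', 3),
--     ('pharmaceutical sciences', 11),
--     ('pharmacology', 11),
--     ('pharmacy', 11),
--     ('physical chemistry', 3),
--     ('physics', 2),
--     ('quantum physics', 2),
--     ('software engineering', 1),
--     ('statistics', 7),
--     ('structural biology', 0),
--     ('virology', 10)
-- ]
--
-- _FIELD_TO_GROUP = dict(_PAIRS)
--
--
-- def is_field_compatible(field1, field2):
--     f1 = str(field1).lower().strip()
--     f2 = str(field2).lower().strip()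
--     if f1 == f2:
--         return True
--     g1 = _FIELD_TO_GROUP.get(f1)
--     return g1 is not None and g1 == _FIELD_TO_GROUP.get(f2)
-- ===== Notes on version B (the rewrite author's own statement) =====
-- stated objective: alternative
-- what changed: Replaces A's per-call scan over twelve group sets (two set-membership tests per group) with a flat alphabetical (field, group-index) table turned into a dict once at import, so each call is two dict lookups compared for equality.
import Mathlib
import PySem

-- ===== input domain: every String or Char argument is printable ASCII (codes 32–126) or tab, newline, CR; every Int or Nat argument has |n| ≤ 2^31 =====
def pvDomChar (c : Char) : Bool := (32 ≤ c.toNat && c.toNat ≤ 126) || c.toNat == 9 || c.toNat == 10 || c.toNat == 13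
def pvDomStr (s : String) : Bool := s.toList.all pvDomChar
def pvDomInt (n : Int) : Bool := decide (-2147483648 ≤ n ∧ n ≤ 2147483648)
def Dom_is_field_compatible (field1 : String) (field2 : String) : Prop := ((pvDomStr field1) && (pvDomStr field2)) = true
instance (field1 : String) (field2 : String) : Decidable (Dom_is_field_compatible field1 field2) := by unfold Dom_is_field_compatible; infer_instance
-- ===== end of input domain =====

-- B replaces A's per-call scan over twelve group sets (two membership tests per group) by a flat
-- alphabetical field->group-index table turned into a dict once at import; a call is two dict
-- lookups compared for equality (objective: alternative; return-value equality is what is proved).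

-- ===== PORT A =====
-- the related_groups list of sets, as in A
def relatedGroupsA : List (PySem.Set String) :=
  [ PySem.Set.ofList ["biology", "molecular biology", "biochemistry", "biophysics", "cell biology", "structural biology"],
    PySem.Set.ofList ["computer science", "software engineering", "data science", "information technology", "artificial intelligence"],
    PySem.Set.ofList ["physics", "applied physics", "quantum physics", "astrophysics"],
    PySem.Set.ofList ["chemistry", "organic chemistry", "analytical chemistry", "physical chemistry", "inorganic chemistry"],
    PySem.Set.ofList ["medicine", "clinical medicine", "medical sciences", "biomedical sciences"],
    PySem.Set.ofList ["engineering", "mechanical engineering", "electrical engineering", "civil engineering"],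
    PySem.Set.ofList ["biotechnology", "bioengineering", "biomedical engineering"],
    PySem.Set.ofList ["mathematics", "applied mathematics", "statistics", "computational mathematics"],
    PySem.Set.ofList ["neuroscience", "cognitive science", "behavioral neuroscience"],
    PySem.Set.ofList ["genetics", "genomics", "molecular genetics"],
    PySem.Set.ofList ["immunology", "microbiology", "virology"],
    PySem.Set.ofList ["pharmacology", "pharmacy", "pharmaceutical sciences"] ]

-- A's 'for group in related_groups: if f1 in group and f2 in group: return True' / 'return False'
def loopA (f1 f2 : String) : List (PySem.Set String) → Bool
  | [] => false
  | g :: rest => if g.contains f1 && g.contains f2 then true else loopA f1 f2 rest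

def is_field_compatible (field1 : String) (field2 : String) : Bool :=
  let f1 := PySem.Str.strip (PySem.Str.lower field1)
  let f2 := PySem.Str.strip (PySem.Str.lower field2)
  if f1 == f2 then true
  else loopA f1 f2 relatedGroupsA

-- ===== PORT B =====
-- the flat alphabetical table _PAIRS of Source B: (field, index of its group)
def pairsB : List (String × Int) :=
  [ ("analytical chemistry", 3),
    ("applied mathematics", 7),
    ("applied physics", 2),
    ("artificial intelligence", 1),
    ("astrophysics", 2),
    ("behavioral neuroscience", 8),
    ("biochemistry", 0),
    ("bioengineering", 6),
    ("biology", 0),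
    ("biomedical engineering", 6),
    ("biomedical sciences", 4),
    ("biophysics", 0),
    ("biotechnology", 6),
    ("cell biology", 0),
    ("chemistry", 3),
    ("civil engineering", 5),
    ("clinical medicine", 4),
    ("cognitive science", 8),
    ("computational mathematics", 7),
    ("computer science", 1),
    ("data science", 1),
    ("electrical engineering", 5),
    ("engineering", 5),
    ("genetics", 9),
    ("genomics", 9),
    ("immunology", 10),
    ("information technology", 1),
    ("inorganic chemistry", 3),
    ("mathematics", 7),
    ("mechanical engineering", 5),
    ("medical sciences", 4),
    ("medicine", 4),
    ("microbiology", 10),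
    ("molecular biology", 0),
    ("molecular genetics", 9),
    ("neuroscience", 8),
    ("organic chemistry", 3),
    ("pharmaceutical sciences", 11),
    ("pharmacology", 11),
    ("pharmacy", 11),
    ("physical chemistry", 3),
    ("physics", 2),
    ("quantum physics", 2),
    ("software engineering", 1),
    ("statistics", 7),
    ("structural biology", 0),
    ("virology", 10) ]

-- _FIELD_TO_GROUP = dict(_PAIRS): the pairs inserted in order into an empty dict
def tableB : PySem.Dict String Int :=
  pairsB.foldl (fun d p => d.insert p.1 p.2) PySem.Dict.empty

def is_field_compatible_alt (field1 : String) (field2 : String) : Bool :=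
  let f1 := PySem.Str.strip (PySem.Str.lower field1)
  let f2 := PySem.Str.strip (PySem.Str.lower field2)
  if f1 == f2 then true
  else
    let g1 := tableB.get? f1
    g1.isSome && g1 == tableB.get? f2

-- ===== PRECONDITION & SPEC =====
def Spec_is_field_compatible (field1 : String) (field2 : String) (out : Bool) : Prop := out = is_field_compatible_alt field1 field2
instance (field1 : String) (field2 : String) (out : Bool) : Decidable (Spec_is_field_compatible field1 field2 out) := by unfold Spec_is_field_compatible; infer_instance

-- ===== CLAIM (what is proved, stated in full; the proofs are below) =====
def Claim_equal_is_field_compatible : Prop := ∀ (field1 : String) (field2 : String), Dom_is_field_compatible field1 field2 → Spec_is_field_compatible field1 field2 (is_field_compatible field1 field2)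

-- ===== LEMMAS AND PROOFS =====

-- first-match lookup in an association list (what Dict.get? computes on nodup keys)
def firstMatch (l : List (String × Int)) (f : String) : Option Int :=
  (l.find? (fun p => p.1 == f)).map (·.2)

-- first group (from index i on) containing f
def lkF (f : String) : Int → List (PySem.Set String) → Option Int
  | _, [] => none
  | i, g :: rest => if g.contains f then some i else lkF f (i + 1) rest

-- the groups flattened into (field, group index) pairs, from index i on
def pairsOf : Int → List (PySem.Set String) → List (String × Int)
  | _, [] => []
  | i, g :: rest => g.map (fun f => (f, i)) ++ pairsOf (i + 1) rest

theorem get?_foldl_insert_nodup (l : List (String × Int)) (d : PySem.Dict String Int)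
    (nd : (l.map Prod.fst).Nodup) (f : String) :
    (l.foldl (fun d p => d.insert p.1 p.2) d).get? f =
      match firstMatch l f with
      | some v => some v
      | none => d.get? f := by
  induction l generalizing d with
  | nil => simp [firstMatch]
  | cons x l ih =>
    simp only [List.map_cons, List.nodup_cons] at nd
    show ((l.foldl (fun d p => d.insert p.1 p.2) (d.insert x.1 x.2))).get? f = _
    rw [ih _ nd.2]
    by_cases hx : f = x.1
    · have hnl : firstMatch l f = none := by
        unfold firstMatch
        rw [List.find?_eq_none.mpr]
        · rfl
        · intro p hp
          simp only [beq_iff_eq]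
          intro hpf
          apply nd.1
          have hpx : p.1 = x.1 := by rw [hpf, hx]
          rw [← hpx]
          exact List.mem_map_of_mem hp
      rw [hnl]
      simp [firstMatch, hx, PySem.Dict.get?_insert_self]
    · have hhd : firstMatch (x :: l) f = firstMatch l f := by
        simp [firstMatch, Ne.symm hx]
      rw [hhd]
      cases firstMatch l f with
      | some v => simp
      | none => simp [PySem.Dict.get?_insert_of_ne _ _ hx]

theorem firstMatch_eq_of_perm (l1 l2 : List (String × Int)) (h : l1.Perm l2)
    (nd : (l1.map Prod.fst).Nodup) (f : String) : firstMatch l1 f = firstMatch l2 f := by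
  unfold firstMatch
  cases hm : l1.find? (fun p => p.1 == f) with
  | none =>
    have h2 : l2.find? (fun p => p.1 == f) = none := by
      rw [List.find?_eq_none] at hm ⊢
      intro p hp
      exact hm p (h.mem_iff.mpr hp)
    rw [h2]
  | some p =>
    have hp := List.find?_some hm
    have hpm : p ∈ l1 := List.mem_of_find?_eq_some hm
    cases h2 : l2.find? (fun p => p.1 == f) with
    | none =>
      rw [List.find?_eq_none] at h2
      exact absurd hp (by simpa using h2 p (h.mem_iff.mp hpm))
    | some q =>
      have hq := List.find?_some h2
      have hqm : q ∈ l1 := h.mem_iff.mpr (List.mem_of_find?_eq_some h2)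
      have hkey : p.1 = q.1 := by
        simp only [beq_iff_eq] at hp hq
        rw [hp, hq]
      have : p = q := List.inj_on_of_nodup_map nd hpm hqm hkey
      rw [this]

theorem firstMatch_append (l1 l2 : List (String × Int)) (f : String) :
    firstMatch (l1 ++ l2) f =
      match firstMatch l1 f with
      | some v => some v
      | none => firstMatch l2 f := by
  unfold firstMatch
  rw [List.find?_append]
  cases l1.find? (fun p => p.1 == f) <;> simp

theorem firstMatch_mapGroup (g : List String) (i : Int) (f : String) :
    firstMatch (g.map (fun x => (x, i))) f = if g.contains f then some i else none := by
  induction g with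
  | nil => simp [firstMatch]
  | cons x g ih =>
    by_cases hx : x = f
    · simp [firstMatch, hx]
    · have hx' : (x == f) = false := beq_eq_false_iff_ne.mpr hx
      simp only [List.map_cons, firstMatch, List.find?_cons, hx'] at *
      rw [ih]
      have hfx : ¬ f = x := fun h => hx h.symm
      simp [hfx]

theorem firstMatch_pairsOf (gs : List (PySem.Set String)) (i : Int) (f : String) :
    firstMatch (pairsOf i gs) f = lkF f i gs := by
  induction gs generalizing i with
  | nil => simp [pairsOf, lkF, firstMatch]
  | cons g rest ih =>
    rw [pairsOf, lkF, firstMatch_append, firstMatch_mapGroup]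
    by_cases hg : f ∈ g <;> simp [hg, ih]

theorem lkF_ge (f : String) (gs : List (PySem.Set String)) (i j : Int)
    (h : lkF f i gs = some j) : i ≤ j := by
  induction gs generalizing i j with
  | nil => simp [lkF] at h
  | cons g rest ih =>
    rw [lkF] at h
    by_cases hg : g.contains f
    · rw [if_pos hg] at h
      have : i = j := by simpa using h
      omega
    · rw [if_neg hg] at h
      have := ih (i + 1) j h
      omega

theorem loopA_false_of_not_mem (f1 f2 : String) (gs : List (PySem.Set String))
    (h : ∀ g ∈ gs, f1 ∉ g) : loopA f1 f2 gs = false := by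
  induction gs with
  | nil => rfl
  | cons g rest ih =>
    have hg : g.contains f1 = false := by
      have : f1 ∉ g := h g (List.mem_cons_self ..)
      simpa using this
    rw [loopA, hg]
    simp [ih (fun g2 hg2 => h g2 (List.mem_cons_of_mem _ hg2))]

theorem loopA_false_of_not_mem_right (f1 f2 : String) (gs : List (PySem.Set String))
    (h : ∀ g ∈ gs, f2 ∉ g) : loopA f1 f2 gs = false := by
  induction gs with
  | nil => rfl
  | cons g rest ih =>
    have hg : g.contains f2 = false := by
      have : f2 ∉ g := h g (List.mem_cons_self ..)
      simpa using this
    rw [loopA, hg]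
    simp [ih (fun g2 hg2 => h g2 (List.mem_cons_of_mem _ hg2))]

-- the core equivalence, for any pairwise-disjoint group list
theorem mainEq (a b : String) (gs : List (PySem.Set String)) (i : Int)
    (hD : List.Pairwise (fun g h => ∀ f, f ∈ g → f ∉ h) gs) :
    loopA a b gs = ((lkF a i gs).isSome && (lkF a i gs == lkF b i gs)) := by
  induction gs generalizing i with
  | nil => simp [loopA, lkF]
  | cons g rest ih =>
    have hhead : ∀ g2 ∈ rest, ∀ f, f ∈ g → f ∉ g2 :=
      fun g2 hg2 => List.rel_of_pairwise_cons hD hg2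
    have htail := hD.of_cons
    by_cases ha : a ∈ g <;> by_cases hb : b ∈ g
    · rw [loopA, lkF, lkF]
      simp [ha, hb]
    · have hLA : loopA a b rest = false :=
        loopA_false_of_not_mem _ _ _ (fun g2 hg2 => hhead g2 hg2 a ha)
      rw [loopA, lkF, lkF]
      cases hrb : lkF b (i + 1) rest with
      | some j =>
        have hij : i + 1 ≤ j := lkF_ge _ _ _ _ hrb
        simp [ha, hb, hLA]
        omega
      | none => simp [ha, hb, hLA]
    · have hLA : loopA a b rest = false :=
        loopA_false_of_not_mem_right _ _ _ (fun g2 hg2 => hhead g2 hg2 b hb)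
      rw [loopA, lkF, lkF]
      cases hra : lkF a (i + 1) rest with
      | some j =>
        have hij : i + 1 ≤ j := lkF_ge _ _ _ _ hra
        simp [ha, hb, hLA]
        omega
      | none => simp [ha, hb, hLA]
    · have hIH := ih (i + 1) htail
      rw [loopA, lkF, lkF]
      cases hra : lkF a (i + 1) rest <;> cases hrb : lkF b (i + 1) rest <;>
        rw [hra, hrb] at hIH <;> simp_all

theorem pairsB_nodup : (pairsB.map Prod.fst).Nodup := by decide

theorem pairsB_perm : pairsB.Perm (pairsOf 0 relatedGroupsA) := by decide

theorem groupsA_disjoint : List.Pairwise (fun g h => ∀ f, f ∈ g → f ∉ h) relatedGroupsA := by decide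

theorem get?_tableB (f : String) : tableB.get? f = lkF f 0 relatedGroupsA := by
  rw [tableB, get?_foldl_insert_nodup _ _ pairsB_nodup,
      firstMatch_eq_of_perm _ _ pairsB_perm pairsB_nodup, firstMatch_pairsOf]
  cases lkF f 0 relatedGroupsA <;> simp [PySem.Dict.get?_empty]

-- ===== VERDICT (by name: the statement is the Claim_ definition above) =====
theorem is_field_compatible_spec : Claim_equal_is_field_compatible := by
  intro field1 field2 _
  unfold Spec_is_field_compatible is_field_compatible is_field_compatible_alt
  set f1 := PySem.Str.strip (PySem.Str.lower field1) with hf1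
  set f2 := PySem.Str.strip (PySem.Str.lower field2) with hf2
  by_cases h : f1 == f2
  · simp [h]
  · simp only [h, Bool.false_eq_true, ite_false]
    rw [get?_tableB, get?_tableB]
    exact mainEq f1 f2 relatedGroupsA 0 groupsA_disjoint
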